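-- pv_equiv track=rewrite | github.com/MrBrantCode/unitest_baseline | mut_generate/mist_train_taco/taco_16420/solution.py | find_smallest_subsegment
-- ===== SOURCE A (Python) =====
-- def find_smallest_subsegment(arr, n):
--     left = dict()
--     count = dict()
--     mx = 0
--     mn = 0
--     startindex = 0
--
--     for i in range(n):
--         ele = arr[i]
--         if ele not in count.keys():
--             left[ele] = i
--             count[ele] = 1
--         else:
--             count[ele] += 1
--
--         if count[ele] > mx:
--             mx = count[ele]
--             mn = i - left[ele] + 1
--             startindex = left[ele]
--         elif count[ele] == mx and i - left[ele] + 1 < mn: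
--             mn = i - left[ele] + 1
--             startindex = left[ele]
--
--     return arr[startindex:startindex + mn]
-- ===== SOURCE B (Python) =====
-- def find_smallest_subsegment(arr, n):
--     count = dict()
--     first = dict()
--     last = dict()
--     for i in range(n):
--         e = arr[i]
--         if e not in count:
--             count[e] = 0
--             first[e] = i
--         count[e] += 1
--         last[e] = i
--
--     bc = 0
--     bspan = 0
--     blast = -1
--     bstart = 0
--     for e in count:
--         c = count[e]
--         sp = last[e] - first[e] + 1
--         if c > bc or (c == bc and (sp < bspan or (sp == bspan and last[e] < blast))):
--             bc, bspan, blast, bstart = c, sp, last[e], first[e]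
--
--     return arr[bstart:bstart + bspan]
-- ===== Notes on version B (the rewrite author's own statement) =====
-- stated objective: alternative
-- what changed: A maintains the best (max-count, min-span, earliest-closing) candidate incrementally inside its single scan; B decouples the two concerns: one pass records count/first/last per element, then a separate pass over the distinct elements selects the best by explicit lexicographic comparison.
import Mathlib
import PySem

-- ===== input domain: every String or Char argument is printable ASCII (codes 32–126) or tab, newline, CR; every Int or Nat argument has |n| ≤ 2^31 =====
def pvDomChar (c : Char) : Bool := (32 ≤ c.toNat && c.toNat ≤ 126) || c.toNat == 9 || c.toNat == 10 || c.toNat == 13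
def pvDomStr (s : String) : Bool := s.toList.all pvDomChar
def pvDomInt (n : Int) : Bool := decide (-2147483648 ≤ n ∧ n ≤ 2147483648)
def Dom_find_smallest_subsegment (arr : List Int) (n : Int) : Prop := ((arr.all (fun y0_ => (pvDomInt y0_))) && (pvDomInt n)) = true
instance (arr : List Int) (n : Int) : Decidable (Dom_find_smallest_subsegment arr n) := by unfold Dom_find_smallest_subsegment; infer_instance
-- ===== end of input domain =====

-- B restructures A: instead of maintaining the best candidate inside the scan, B records
-- count/first/last per element in one pass and then selects the best distinct element by an
-- explicit lexicographic comparison in a second pass (objective: alternative decomposition).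

-- ===== PORT A =====
-- loop body of A's single for-loop: state = (left, count, mx, mn, startindex)
def pvBodyA (s : PySem.Dict Int Int × PySem.Dict Int Int × Int × Int × Int) (i e : Int) :
    PySem.Dict Int Int × PySem.Dict Int Int × Int × Int × Int :=
  match s with
  | (left, count, mx, mn, start) =>
    let seen := count.contains e            -- 'ele not in count.keys()' (negated)
    let left := if seen then left else left.insert e i
    let count := if seen then count.insert e (count.getD e 0 + 1) else count.insert e 1
    let c := count.getD e 0                 -- count[ele]
    let l := left.getD e 0                  -- left[ele]
    if mx < c then (left, count, c, i - l + 1, l)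
    else if c = mx ∧ i - l + 1 < mn then (left, count, mx, i - l + 1, l)
    else (left, count, mx, mn, start)

def find_smallest_subsegment (arr : List Int) (n : Int) : List Int :=
  let s := (PySem.List.pyRange 0 n 1).foldl
      (fun s i => pvBodyA s i (PySem.List.pyGetD arr i 0))   -- ele = arr[i] (in range under Pre_)
      (PySem.Dict.empty, PySem.Dict.empty, 0, 0, 0)
  PySem.List.slice arr (some s.2.2.2.2) (some (s.2.2.2.2 + s.2.2.2.1))  -- arr[startindex:startindex+mn]

-- ===== PORT B =====
-- first pass of B: state = (count, first, last)
def pvBodyB1 (t : PySem.Dict Int Int × PySem.Dict Int Int × PySem.Dict Int Int) (i e : Int) :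
    PySem.Dict Int Int × PySem.Dict Int Int × PySem.Dict Int Int :=
  match t with
  | (count, first, last) =>
    let seen := count.contains e
    let count := if seen then count else count.insert e 0
    let first := if seen then first else first.insert e i
    (count.insert e (count.getD e 0 + 1), first, last.insert e i)

-- second pass of B: state = (bc, bspan, blast, bstart)
def pvBodyB2 (count first last : PySem.Dict Int Int) (b : Int × Int × Int × Int) (e : Int) :
    Int × Int × Int × Int :=
  match b with
  | (bc, bspan, blast, bstart) =>
    let c := count.getD e 0
    let sp := last.getD e 0 - first.getD e 0 + 1
    if bc < c ∨ (c = bc ∧ (sp < bspan ∨ (sp = bspan ∧ last.getD e 0 < blast)))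
    then (c, sp, last.getD e 0, first.getD e 0)
    else (bc, bspan, blast, bstart)

def find_smallest_subsegment_alt (arr : List Int) (n : Int) : List Int :=
  let t := (PySem.List.pyRange 0 n 1).foldl
      (fun t i => pvBodyB1 t i (PySem.List.pyGetD arr i 0))
      (PySem.Dict.empty, PySem.Dict.empty, PySem.Dict.empty)
  let b := (PySem.Dict.keys t.1).foldl (pvBodyB2 t.1 t.2.1 t.2.2) (0, 0, -1, 0)
  PySem.List.slice arr (some b.2.2.2) (some (b.2.2.2 + b.2.1))  -- arr[bstart:bstart+bspan]

-- ===== PRECONDITION & SPEC =====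
-- A indexes arr[i] for i in range(n): it raises IndexError iff n > len(arr) (negative n is fine).
def Pre_find_smallest_subsegment (arr : List Int) (n : Int) : Prop := n ≤ (arr.length : Int)
instance (arr : List Int) (n : Int) : Decidable (Pre_find_smallest_subsegment arr n) := by
  unfold Pre_find_smallest_subsegment; infer_instance
def pvWitness_find_smallest_subsegment : List Int × Int := ([1, 2, 2, 3], 4)

def Spec_find_smallest_subsegment (arr : List Int) (n : Int) (out : List Int) : Prop :=
  out = find_smallest_subsegment_alt arr n
instance (arr : List Int) (n : Int) (out : List Int) : Decidable (Spec_find_smallest_subsegment arr n out) := by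
  unfold Spec_find_smallest_subsegment; infer_instance

-- ===== CLAIM (what is proved, stated in full; the proofs are below) =====
def Claim_equal_find_smallest_subsegment : Prop :=
  ∀ (arr : List Int) (n : Int), Dom_find_smallest_subsegment arr n →
    Pre_find_smallest_subsegment arr n →
    Spec_find_smallest_subsegment arr n (find_smallest_subsegment arr n)

-- ===== LEMMAS AND PROOFS =====

-- abstract per-element data of a processed prefix p: count, first index, last index, span
def cntZ (p : List Int) (e : Int) : Int := (p.count e : Int)
def fstZ (p : List Int) (e : Int) : Int := (p.idxOf e : Int)
def lstZ (p : List Int) (e : Int) : Int := (p.length : Int) - 1 - (p.reverse.idxOf e : Int)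
def spanZ (p : List Int) (e : Int) : Int := lstZ p e - fstZ p e + 1

def CountInv (p : List Int) (d : PySem.Dict Int Int) : Prop :=
  ∀ e, d.get? e = if e ∈ p then some (cntZ p e) else none
def FirstInv (p : List Int) (d : PySem.Dict Int Int) : Prop :=
  ∀ e, d.get? e = if e ∈ p then some (fstZ p e) else none
def LastInv (p : List Int) (d : PySem.Dict Int Int) : Prop :=
  ∀ e, d.get? e = if e ∈ p then some (lstZ p e) else none

def MaxInv (p : List Int) (mx : Int) : Prop :=
  (p = [] → mx = 0) ∧ (∀ e ∈ p, cntZ p e ≤ mx) ∧ (p ≠ [] → ∃ e ∈ p, cntZ p e = mx)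

def BestInv (p : List Int) (mx mn start : Int) : Prop :=
  (p = [] → mn = 0 ∧ start = 0) ∧
  (p ≠ [] → ∃ e ∈ p, cntZ p e = mx ∧ start = fstZ p e ∧ mn = spanZ p e ∧
    ∀ e' ∈ p, cntZ p e' = mx →
      spanZ p e < spanZ p e' ∨ (spanZ p e = spanZ p e' ∧ lstZ p e ≤ lstZ p e'))

def AInv (p : List Int) (s : PySem.Dict Int Int × PySem.Dict Int Int × Int × Int × Int) : Prop :=
  FirstInv p s.1 ∧ CountInv p s.2.1 ∧ MaxInv p s.2.2.1 ∧ BestInv p s.2.2.1 s.2.2.2.1 s.2.2.2.2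

theorem cntZ_append (p : List Int) (x e : Int) :
    cntZ (p ++ [x]) e = cntZ p e + (if e = x then 1 else 0) := by
  simp only [cntZ, List.count_append, List.count_singleton]
  rcases eq_or_ne e x with h | h
  · simp [h]
  · simp [h, Ne.symm h]

theorem fstZ_append_mem (p : List Int) (x e : Int) (he : e ∈ p) :
    fstZ (p ++ [x]) e = fstZ p e := by
  simp [fstZ, List.idxOf_append_of_mem he]

theorem fstZ_append_self (p : List Int) (x : Int) (hx : x ∉ p) :
    fstZ (p ++ [x]) x = (p.length : Int) := by
  simp [fstZ, List.idxOf_append, hx]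

theorem lstZ_append_self (p : List Int) (x : Int) :
    lstZ (p ++ [x]) x = (p.length : Int) := by
  simp [lstZ]

theorem lstZ_append_ne (p : List Int) (x e : Int) (hne : e ≠ x) :
    lstZ (p ++ [x]) e = lstZ p e := by
  simp only [lstZ, List.reverse_append, List.reverse_singleton, List.singleton_append,
    List.idxOf_cons_ne _ (Ne.symm hne), List.length_append, List.length_singleton]
  push_cast
  omega

theorem lstZ_bounds (p : List Int) (e : Int) (he : e ∈ p) :
    0 ≤ lstZ p e ∧ lstZ p e < (p.length : Int) := by
  have h1 : p.reverse.idxOf e < p.reverse.length :=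
    List.idxOf_lt_length_of_mem (List.mem_reverse.mpr he)
  have h2 : p.length ≠ 0 := by
    intro h0; exact absurd he (by simp [List.eq_nil_of_length_eq_zero h0])
  simp only [List.length_reverse] at h1
  simp only [lstZ]
  omega

theorem cntZ_pos (p : List Int) (e : Int) (he : e ∈ p) : 1 ≤ cntZ p e := by
  have := List.one_le_count_iff.mpr he
  simp only [cntZ]; omega

theorem cntZ_nonneg (p : List Int) (e : Int) : 0 ≤ cntZ p e := by
  simp [cntZ]

theorem AInv_init : AInv [] (PySem.Dict.empty, PySem.Dict.empty, 0, 0, 0) := by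
  refine ⟨fun e => by simp [PySem.Dict.get?_empty], fun e => by simp [PySem.Dict.get?_empty],
    ⟨fun _ => rfl, by simp, by simp⟩, ⟨fun _ => ⟨rfl, rfl⟩, by simp⟩⟩

theorem mem_append_singleton_iff (p : List Int) (x e : Int) : e ∈ p ++ [x] ↔ e ∈ p ∨ e = x := by
  simp

theorem AInv_mk (p : List Int) (l c : PySem.Dict Int Int) (mx mn st : Int)
    (h1 : FirstInv p l) (h2 : CountInv p c) (h3 : MaxInv p mx) (h4 : BestInv p mx mn st) :
    AInv p (l, c, mx, mn, st) := ⟨h1, h2, h3, h4⟩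

theorem AInv_core (p : List Int) (x : Int) (left' count' : PySem.Dict Int Int) (mx mn start : Int)
    (hF' : FirstInv (p ++ [x]) left') (hC' : CountInv (p ++ [x]) count')
    (hM : MaxInv p mx) (hB : BestInv p mx mn start) :
    AInv (p ++ [x])
      (if mx < cntZ (p ++ [x]) x then
        (left', count', cntZ (p ++ [x]) x, (p.length : Int) - fstZ (p ++ [x]) x + 1, fstZ (p ++ [x]) x)
       else if cntZ (p ++ [x]) x = mx ∧ (p.length : Int) - fstZ (p ++ [x]) x + 1 < mn then
        (left', count', mx, (p.length : Int) - fstZ (p ++ [x]) x + 1, fstZ (p ++ [x]) x)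
       else (left', count', mx, mn, start)) := by
  obtain ⟨hM0, hMle, hMex⟩ := hM
  obtain ⟨hB0, hBne⟩ := hB
  have hxmem : x ∈ p ++ [x] := by simp
  have hne' : p ++ [x] ≠ [] := by simp
  have hcx : cntZ (p ++ [x]) x = cntZ p x + 1 := by rw [cntZ_append]; simp
  have hcother : ∀ e, e ≠ x → cntZ (p ++ [x]) e = cntZ p e := by
    intro e he; rw [cntZ_append]; simp [he]
  have hlx : lstZ (p ++ [x]) x = (p.length : Int) := lstZ_append_self p x
  have hspanx : spanZ (p ++ [x]) x = (p.length : Int) - fstZ (p ++ [x]) x + 1 := by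
    rw [spanZ, hlx]
  have hmx0 : 0 ≤ mx := by
    rcases eq_or_ne p [] with hp | hp
    · rw [hM0 hp]
    · obtain ⟨em, hem, hcm⟩ := hMex hp
      have := cntZ_nonneg p em; omega
  by_cases h1 : mx < cntZ (p ++ [x]) x
  · -- new strict maximum: x becomes the unique best candidate
    simp only [if_pos h1]
    refine AInv_mk _ _ _ _ _ _ hF' hC' ⟨fun h => absurd h hne', ?_, fun _ => ⟨x, hxmem, rfl⟩⟩
      ⟨fun h => absurd h hne', fun _ => ⟨x, hxmem, rfl, rfl, hspanx.symm, ?_⟩⟩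
    · intro e he
      rcases (mem_append_singleton_iff p x e).mp he with hep | hex
      · by_cases hex : e = x
        · subst hex; exact le_refl _
        · rw [hcother e hex]; exact le_trans (hMle e hep) (le_of_lt h1)
      · subst hex; exact le_refl _
    · intro e' he' hce'
      by_cases hex : e' = x
      · subst hex; right; exact ⟨rfl, le_refl _⟩
      · exfalso
        rcases (mem_append_singleton_iff p x e').mp he' with hep | h; swap
        · exact hex h
        · rw [hcother e' hex] at hce'
          have := hMle e' hep; omega
  · -- count of x does not exceed the old maximum → the old maximum is positive, p nonempty
    have hcnn : 0 ≤ cntZ p x := cntZ_nonneg p x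
    have hmx1 : 1 ≤ mx := by omega
    have hp : p ≠ [] := by intro h; rw [hM0 h] at hmx1; omega
    obtain ⟨e0, he0, hc0, hs0, hm0, hall0⟩ := hBne hp
    have he0x : e0 ≠ x := by intro h; subst h; omega
    have he0' : e0 ∈ p ++ [x] := by simp [he0]
    have hc0' : cntZ (p ++ [x]) e0 = mx := by rw [hcother e0 he0x]; exact hc0
    have hf0' : fstZ (p ++ [x]) e0 = fstZ p e0 := fstZ_append_mem p x e0 he0
    have hl0' : lstZ (p ++ [x]) e0 = lstZ p e0 := lstZ_append_ne p x e0 he0x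
    have hsp0' : spanZ (p ++ [x]) e0 = spanZ p e0 := by rw [spanZ, hf0', hl0', spanZ]
    have hspother : ∀ e, e ∈ p → e ≠ x → spanZ (p ++ [x]) e = spanZ p e := by
      intro e he hex; rw [spanZ, fstZ_append_mem p x e he, lstZ_append_ne p x e hex, spanZ]
    have hMax' : MaxInv (p ++ [x]) mx := by
      refine ⟨fun h => absurd h hne', ?_, fun _ => ⟨e0, he0', hc0'⟩⟩
      intro e he
      by_cases hex : e = x
      · subst hex; omega
      · rcases (mem_append_singleton_iff p x e).mp he with hep | h
        · rw [hcother e hex]; exact hMle e hep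
        · exact absurd h hex
    by_cases h2 : cntZ (p ++ [x]) x = mx ∧ (p.length : Int) - fstZ (p ++ [x]) x + 1 < mn
    · -- x ties the maximum count with a strictly smaller span: x becomes the best
      simp only [if_neg h1, if_pos h2]
      refine AInv_mk _ _ _ _ _ _ hF' hC' hMax' ⟨fun h => absurd h hne',
        fun _ => ⟨x, hxmem, h2.1, rfl, hspanx.symm, ?_⟩⟩
      intro e' he' hce'
      by_cases hex : e' = x
      · subst hex; right; exact ⟨rfl, le_refl _⟩
      · left
        rcases (mem_append_singleton_iff p x e').mp he' with hep | h; swap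
        · exact absurd h hex
        · rw [hcother e' hex] at hce'
          have hlex := hall0 e' hep hce'
          rw [hspanx, hspother e' hep hex]
          have h22 : (p.length : Int) - fstZ (p ++ [x]) x + 1 < mn := h2.2
          omega
    · -- the old best stays
      simp only [if_neg h1, if_neg h2]
      refine AInv_mk _ _ _ _ _ _ hF' hC' hMax' ⟨fun h => absurd h hne',
        fun _ => ⟨e0, he0', hc0', hs0.trans hf0'.symm, hm0.trans hsp0'.symm, ?_⟩⟩
      intro e' he' hce'
      by_cases hex : e' = x
      · rw [hex] at hce' ⊢
        rw [hsp0', hl0', hlx, hspanx]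
        have hb := lstZ_bounds p e0 he0
        have hnot := h2
        omega
      · rcases (mem_append_singleton_iff p x e').mp he' with hep | h; swap
        · exact absurd h hex
        · rw [hcother e' hex] at hce'
          have := hall0 e' hep hce'
          rw [hsp0', hspother e' hep hex, hl0', lstZ_append_ne p x e' hex]
          exact this

theorem AInv_step (p : List Int) (x : Int) (s : PySem.Dict Int Int × PySem.Dict Int Int × Int × Int × Int)
    (h : AInv p s) : AInv (p ++ [x]) (pvBodyA s (p.length : Int) x) := by
  obtain ⟨left, count, mx, mn, start⟩ := s
  obtain ⟨hF, hC, hM, hB⟩ := h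
  have hcont : count.contains x = decide (x ∈ p) := by
    rw [PySem.Dict.contains_eq_isSome_get?, hC x]
    by_cases hx : x ∈ p <;> simp [hx]
  by_cases hx : x ∈ p
  · -- x already seen: left unchanged, count bumped
    have hgd : count.getD x 0 = cntZ p x := by
      rw [PySem.Dict.getD_eq_get?_getD, hC x]; simp [hx]
    have hF' : FirstInv (p ++ [x]) left := by
      intro e
      rw [hF e]
      by_cases hex : e = x
      · subst hex; simp [hx, fstZ_append_mem p e e hx]
      · by_cases hep : e ∈ p
        · simp [hep, hex, fstZ_append_mem p x e hep]
        · simp [hep, hex]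
    have hC' : CountInv (p ++ [x]) (count.insert x (count.getD x 0 + 1)) := by
      intro e
      by_cases hex : e = x
      · subst hex
        rw [PySem.Dict.get?_insert_self, hgd]
        simp [cntZ_append]
      · rw [PySem.Dict.get?_insert_of_ne _ _ hex, hC e, cntZ_append]
        by_cases hep : e ∈ p <;> simp [hep, hex]
    have hc : (count.insert x (count.getD x 0 + 1)).getD x 0 = cntZ (p ++ [x]) x := by
      rw [PySem.Dict.getD_eq_get?_getD, hC' x]; simp
    have hl : left.getD x 0 = fstZ (p ++ [x]) x := by
      rw [PySem.Dict.getD_eq_get?_getD, hF' x]; simp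
    simp only [pvBodyA, hcont, hx, decide_true, if_true, hc, hl]
    exact AInv_core p x left (count.insert x (count.getD x 0 + 1)) mx mn start hF' hC' hM hB
  · -- x fresh: record its first index, count becomes 1
    have hcx0 : cntZ p x = 0 := by simp [cntZ, List.count_eq_zero.mpr hx]
    have hF' : FirstInv (p ++ [x]) (left.insert x (p.length : Int)) := by
      intro e
      by_cases hex : e = x
      · subst hex
        rw [PySem.Dict.get?_insert_self, fstZ_append_self p e hx]
        simp
      · rw [PySem.Dict.get?_insert_of_ne _ _ hex, hF e]
        by_cases hep : e ∈ p
        · simp [hep, hex, fstZ_append_mem p x e hep]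
        · simp [hep, hex]
    have hC' : CountInv (p ++ [x]) (count.insert x 1) := by
      intro e
      by_cases hex : e = x
      · subst hex
        rw [PySem.Dict.get?_insert_self]
        simp [cntZ_append, hcx0]
      · rw [PySem.Dict.get?_insert_of_ne _ _ hex, hC e, cntZ_append]
        by_cases hep : e ∈ p <;> simp [hep, hex]
    have hc : (count.insert x 1).getD x 0 = cntZ (p ++ [x]) x := by
      rw [PySem.Dict.getD_eq_get?_getD, hC' x]; simp
    have hl : (left.insert x (p.length : Int)).getD x 0 = fstZ (p ++ [x]) x := by
      rw [PySem.Dict.getD_eq_get?_getD, hF' x]; simp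
    simp only [pvBodyA, hcont, hx, decide_false, Bool.false_eq_true, if_false, hc, hl]
    exact AInv_core p x (left.insert x (p.length : Int)) (count.insert x 1) mx mn start hF' hC' hM hB

def BInv (p : List Int) (t : PySem.Dict Int Int × PySem.Dict Int Int × PySem.Dict Int Int) : Prop :=
  CountInv p t.1 ∧ FirstInv p t.2.1 ∧ LastInv p t.2.2

theorem BInv_init : BInv [] (PySem.Dict.empty, PySem.Dict.empty, PySem.Dict.empty) := by
  refine ⟨fun e => by simp [PySem.Dict.get?_empty], fun e => by simp [PySem.Dict.get?_empty],
    fun e => by simp [PySem.Dict.get?_empty]⟩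

theorem BInv_step (p : List Int) (x : Int)
    (t : PySem.Dict Int Int × PySem.Dict Int Int × PySem.Dict Int Int)
    (h : BInv p t) : BInv (p ++ [x]) (pvBodyB1 t (p.length : Int) x) := by
  obtain ⟨count, first, last⟩ := t
  obtain ⟨hC, hF, hL⟩ := h
  have hcont : count.contains x = decide (x ∈ p) := by
    rw [PySem.Dict.contains_eq_isSome_get?, hC x]
    by_cases hx : x ∈ p <;> simp [hx]
  have hL' : LastInv (p ++ [x]) (last.insert x (p.length : Int)) := by
    intro e
    by_cases hex : e = x
    · subst hex
      rw [PySem.Dict.get?_insert_self, lstZ_append_self p e]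
      simp
    · rw [PySem.Dict.get?_insert_of_ne _ _ hex, hL e]
      by_cases hep : e ∈ p
      · simp [hep, hex, lstZ_append_ne p x e hex]
      · simp [hep, hex]
  by_cases hx : x ∈ p
  · have hgd : count.getD x 0 = cntZ p x := by
      rw [PySem.Dict.getD_eq_get?_getD, hC x]; simp [hx]
    have hC' : CountInv (p ++ [x]) (count.insert x (count.getD x 0 + 1)) := by
      intro e
      by_cases hex : e = x
      · subst hex
        rw [PySem.Dict.get?_insert_self, hgd]
        simp [cntZ_append]
      · rw [PySem.Dict.get?_insert_of_ne _ _ hex, hC e, cntZ_append]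
        by_cases hep : e ∈ p <;> simp [hep, hex]
    have hF' : FirstInv (p ++ [x]) first := by
      intro e
      rw [hF e]
      by_cases hex : e = x
      · subst hex; simp [hx, fstZ_append_mem p e e hx]
      · by_cases hep : e ∈ p
        · simp [hep, hex, fstZ_append_mem p x e hep]
        · simp [hep, hex]
    simp only [pvBodyB1, hcont, hx, decide_true, if_true]
    exact ⟨hC', hF', hL'⟩
  · have hcx0 : cntZ p x = 0 := by simp [cntZ, List.count_eq_zero.mpr hx]
    have hC' : CountInv (p ++ [x]) ((count.insert x 0).insert x ((count.insert x 0).getD x 0 + 1)) := by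
      intro e
      by_cases hex : e = x
      · subst hex
        rw [PySem.Dict.get?_insert_self, PySem.Dict.getD_insert_self]
        simp [cntZ_append, hcx0]
      · rw [PySem.Dict.get?_insert_of_ne _ _ hex, PySem.Dict.get?_insert_of_ne _ _ hex, hC e,
          cntZ_append]
        by_cases hep : e ∈ p <;> simp [hep, hex]
    have hF' : FirstInv (p ++ [x]) (first.insert x (p.length : Int)) := by
      intro e
      by_cases hex : e = x
      · subst hex
        rw [PySem.Dict.get?_insert_self, fstZ_append_self p e hx]
        simp
      · rw [PySem.Dict.get?_insert_of_ne _ _ hex, hF e]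
        by_cases hep : e ∈ p
        · simp [hep, hex, fstZ_append_mem p x e hep]
        · simp [hep, hex]
    simp only [pvBodyB1, hcont, hx, decide_false, Bool.false_eq_true, if_false]
    exact ⟨hC', hF', hL'⟩

-- the (count, span, last, first) tuple B compares
def KeyZ (p : List Int) (e : Int) : Int × Int × Int × Int := (cntZ p e, spanZ p e, lstZ p e, fstZ p e)

-- "k does not beat b" in B's lexicographic comparison
def NB (k b : Int × Int × Int × Int) : Prop :=
  k.1 ≤ b.1 ∧ (k.1 = b.1 → b.2.1 ≤ k.2.1 ∧ (k.2.1 = b.2.1 → b.2.2.1 ≤ k.2.2.1))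

theorem B2_step (p : List Int) (count first last : PySem.Dict Int Int)
    (hC : CountInv p count) (hF : FirstInv p first) (hL : LastInv p last)
    (b : Int × Int × Int × Int) (e : Int) (he : e ∈ p) :
    pvBodyB2 count first last b e =
      if b.1 < cntZ p e ∨ (cntZ p e = b.1 ∧ (spanZ p e < b.2.1 ∨ (spanZ p e = b.2.1 ∧ lstZ p e < b.2.2.1)))
      then KeyZ p e else b := by
  obtain ⟨bc, bspan, blast, bstart⟩ := b
  have hcg : count.getD e 0 = cntZ p e := by
    rw [PySem.Dict.getD_eq_get?_getD, hC e]; simp [he]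
  have hfg : first.getD e 0 = fstZ p e := by
    rw [PySem.Dict.getD_eq_get?_getD, hF e]; simp [he]
  have hlg : last.getD e 0 = lstZ p e := by
    rw [PySem.Dict.getD_eq_get?_getD, hL e]; simp [he]
  simp only [pvBodyB2, hcg, hfg, hlg, KeyZ, spanZ]

theorem B2_fold (p : List Int) (count first last : PySem.Dict Int Int)
    (hC : CountInv p count) (hF : FirstInv p first) (hL : LastInv p last)
    (ks : List Int) (hks : ∀ e ∈ ks, e ∈ p) :
    (ks = [] ∧ ks.foldl (pvBodyB2 count first last) (0, 0, -1, 0) = (0, 0, -1, 0)) ∨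
    (∃ e ∈ ks, ks.foldl (pvBodyB2 count first last) (0, 0, -1, 0) = KeyZ p e ∧
      ∀ e' ∈ ks, NB (KeyZ p e') (ks.foldl (pvBodyB2 count first last) (0, 0, -1, 0))) := by
  induction ks using List.reverseRecOn with
  | nil => exact Or.inl ⟨rfl, rfl⟩
  | append_singleton ks e ih =>
    have hep : e ∈ p := hks e (by simp)
    have hks' : ∀ e' ∈ ks, e' ∈ p := fun e' h => hks e' (by simp [h])
    simp only [List.foldl_append, List.foldl_cons, List.foldl_nil]
    rw [B2_step p count first last hC hF hL _ e hep]
    rcases ih hks' with ⟨hnil, hval⟩ | ⟨e0, he0, hval, hall⟩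
    · subst hnil
      simp only [List.foldl_nil]
      have hpos : (0 : Int) < cntZ p e := cntZ_pos p e hep
      rw [if_pos (Or.inl hpos)]
      refine Or.inr ⟨e, by simp, rfl, ?_⟩
      intro e' he'
      simp only [List.nil_append, List.mem_singleton] at he'
      subst he'
      exact ⟨le_refl _, fun _ => ⟨le_refl _, fun _ => le_refl _⟩⟩
    · rw [hval]
      by_cases hcond : (KeyZ p e0).1 < cntZ p e ∨ (cntZ p e = (KeyZ p e0).1 ∧
          (spanZ p e < (KeyZ p e0).2.1 ∨ (spanZ p e = (KeyZ p e0).2.1 ∧ lstZ p e < (KeyZ p e0).2.2.1)))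
      · rw [if_pos hcond]
        refine Or.inr ⟨e, by simp, rfl, ?_⟩
        intro e' he'
        rcases List.mem_append.mp he' with h | h
        · have hnb := hall e' h
          rw [hval] at hnb
          simp only [NB, KeyZ] at hnb hcond ⊢
          omega
        · simp only [List.mem_singleton] at h
          subst h
          exact ⟨le_refl _, fun _ => ⟨le_refl _, fun _ => le_refl _⟩⟩
      · rw [if_neg hcond]
        refine Or.inr ⟨e0, by simp [he0], rfl, ?_⟩
        intro e' he'
        rcases List.mem_append.mp he' with h | h
        · have hnb := hall e' h
          rw [hval] at hnb
          exact hnb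
        · simp only [List.mem_singleton] at h
          subst h
          simp only [NB, KeyZ] at hcond ⊢
          omega

-- the selected (start, mn) of A equals the selected (bstart, bspan) of B
theorem states_agree (p : List Int)
    (s : PySem.Dict Int Int × PySem.Dict Int Int × Int × Int × Int)
    (t : PySem.Dict Int Int × PySem.Dict Int Int × PySem.Dict Int Int)
    (hA : AInv p s) (hB : BInv p t) :
    s.2.2.2.2 = ((PySem.Dict.keys t.1).foldl (pvBodyB2 t.1 t.2.1 t.2.2) (0, 0, -1, 0)).2.2.2 ∧
    s.2.2.2.1 = ((PySem.Dict.keys t.1).foldl (pvBodyB2 t.1 t.2.1 t.2.2) (0, 0, -1, 0)).2.1 := by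
  obtain ⟨hF, hC, ⟨hM0, hMle, hMex⟩, hB0, hBne⟩ := hA
  obtain ⟨hCt, hFt, hLt⟩ := hB
  have hkeys : ∀ e, e ∈ PySem.Dict.keys t.1 ↔ e ∈ p := by
    intro e
    rw [← PySem.Dict.contains_iff_mem_keys, PySem.Dict.contains_eq_isSome_get?, hCt e]
    by_cases hep : e ∈ p <;> simp [hep]
  rcases B2_fold p t.1 t.2.1 t.2.2 hCt hFt hLt (PySem.Dict.keys t.1) (fun e h => (hkeys e).mp h)
    with ⟨hnil, hval⟩ | ⟨e1, he1, hval, hall⟩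
  · have hp : p = [] := by
      rw [List.eq_nil_iff_forall_not_mem]
      intro e he
      have := (hkeys e).mpr he
      rw [hnil] at this
      simp at this
    obtain ⟨hmn, hst⟩ := hB0 hp
    rw [hval, hmn, hst]
    exact ⟨rfl, rfl⟩
  · have he1p : e1 ∈ p := (hkeys e1).mp he1
    have hp : p ≠ [] := fun h => by subst h; simp at he1p
    obtain ⟨e0, he0, hc0, hs0, hm0, hall0⟩ := hBne hp
    obtain ⟨em, hem, hcm⟩ := hMex hp
    have hnbm := hall em ((hkeys em).mpr hem)
    rw [hval] at hnbm
    have hnb0 := hall e0 ((hkeys e0).mpr he0)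
    rw [hval] at hnb0
    have hle1 := hMle e1 he1p
    -- e1 attains the maximum count
    have hc1 : cntZ p e1 = s.2.2.1 := by
      simp only [NB, KeyZ] at hnbm
      omega
    have hlex01 := hall0 e1 he1p hc1
    have hsp0 : spanZ p e0 = lstZ p e0 - fstZ p e0 + 1 := rfl
    have hsp1 : spanZ p e1 = lstZ p e1 - fstZ p e1 + 1 := rfl
    rw [hval]
    simp only [NB, KeyZ] at hnb0
    constructor
    · show s.2.2.2.2 = fstZ p e1
      rw [hs0]
      omega
    · show s.2.2.2.1 = spanZ p e1
      rw [hm0]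
      omega

theorem slice_congr (arr : List Int) (s1 m1 s2 m2 : Int) (hs : s1 = s2) (hm : m1 = m2) :
    PySem.List.slice arr (some s1) (some (s1 + m1)) = PySem.List.slice arr (some s2) (some (s2 + m2)) := by
  rw [hs, hm]

theorem pyGetD_take (arr : List Int) (k : Nat) (i : Int) (h0 : 0 ≤ i) (hik : i < (k : Int))
    (hk : (k : Int) ≤ (arr.length : Int)) :
    PySem.List.pyGetD (arr.take k) i 0 = PySem.List.pyGetD arr i 0 := by
  have h1 : i < ((arr.take k).length : Int) := by simp [List.length_take]; omega
  have h2 : i < (arr.length : Int) := by omega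
  rw [PySem.List.pyGetD_eq_getElem _ _ h0 h1, PySem.List.pyGetD_eq_getElem _ _ h0 h2]
  rw [List.getElem_take]

theorem fold_range_eq_fold_enumerate (arr : List Int) (n : Int) (hn : n ≤ (arr.length : Int))
    {σ : Type} (f : σ → Int → Int → σ) (init : σ) :
    (PySem.List.pyRange 0 n 1).foldl (fun s i => f s i (PySem.List.pyGetD arr i 0)) init
      = (PySem.List.enumerate (arr.take n.toNat) 0).foldl (fun s q => f s q.1 q.2) init := by
  rcases le_or_gt n 0 with h0 | hpos
  · have h1 : PySem.List.pyRange 0 n 1 = [] := by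
      rw [List.eq_nil_iff_forall_not_mem]
      intro i hi
      have := PySem.List.mem_pyRange_one.mp hi
      omega
    have h2 : arr.take n.toNat = [] := by
      have : n.toNat = 0 := by omega
      simp [this]
    rw [h1, h2]
    rfl
  · have hlen : ((arr.take n.toNat).length : Int) = n := by
      simp only [List.length_take]
      omega
    have hlen' : PySem.List.len (arr.take n.toNat) = n := by
      simpa [PySem.List.len] using hlen
    rw [PySem.List.enumerate_eq_map_pyRange _ 0, hlen', List.foldl_map]
    apply PySem.List.foldl_congr_mem
    intro acc i hi
    obtain ⟨hi0, hin⟩ := PySem.List.mem_pyRange_one.mp hi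
    rw [pyGetD_take arr n.toNat i hi0 (by omega) (by omega)]

theorem A_fold_inv (p : List Int) :
    AInv p ((PySem.List.enumerate p 0).foldl (fun s q => pvBodyA s q.1 q.2)
      (PySem.Dict.empty, PySem.Dict.empty, 0, 0, 0)) := by
  induction p using List.reverseRecOn with
  | nil => exact AInv_init
  | append_singleton p x ih =>
    rw [PySem.List.enumerate_append, List.foldl_append]
    simp only [PySem.List.enumerate, List.foldl_cons, List.foldl_nil, zero_add]
    exact AInv_step p x _ ih

theorem B_fold_inv (p : List Int) :
    BInv p ((PySem.List.enumerate p 0).foldl (fun t q => pvBodyB1 t q.1 q.2)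
      (PySem.Dict.empty, PySem.Dict.empty, PySem.Dict.empty)) := by
  induction p using List.reverseRecOn with
  | nil => exact BInv_init
  | append_singleton p x ih =>
    rw [PySem.List.enumerate_append, List.foldl_append]
    simp only [PySem.List.enumerate, List.foldl_cons, List.foldl_nil, zero_add]
    exact BInv_step p x _ ih

-- ===== VERDICT (by name: the statement is the Claim_ definition above) =====
theorem find_smallest_subsegment_spec : Claim_equal_find_smallest_subsegment := by
  intro arr n _ hpre
  unfold Spec_find_smallest_subsegment
  unfold find_smallest_subsegment find_smallest_subsegment_alt
  rw [fold_range_eq_fold_enumerate arr n hpre pvBodyA _,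
    fold_range_eq_fold_enumerate arr n hpre pvBodyB1 _]
  obtain ⟨h1, h2⟩ := states_agree (arr.take n.toNat) _ _ (A_fold_inv _) (B_fold_inv _)
  exact slice_congr arr _ _ _ _ h1 h2
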